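-- pv_equiv track=rewrite | github.com/chikingsley/book-cleaning | universal_doc_processor/utils/post_processor.py | _detect_tables
-- ===== SOURCE A (Python) =====
-- def _detect_tables(lines: list[str]) -> tuple[list[str], int]:
--     """Detect and format tables."""
--     # Simple table detection - look for lines with | characters
--     tables_detected = 0
--     in_table = False
--
--     for line in lines:
--         if "|" in line and len(line.split("|")) >= 3:
--             if not in_table:
--                 tables_detected += 1
--                 in_table = True
--         else:
--             in_table = False
--
--     return lines, tables_detected
-- ===== SOURCE B (Python) =====
-- def _detect_tables(lines: list[str]) -> tuple[list[str], int]: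
--     """Detect and format tables."""
--     # Stage 1: map each line to its table-row flag.
--     flags = ["|" in line and len(line.split("|")) >= 3 for line in lines]
--     # Stage 2: group-by-hand over the flag list: jump over each maximal run
--     # of equal flags and count the runs whose flag is True.
--     tables_detected = 0
--     i = 0
--     while i < len(flags):
--         j = i
--         while j < len(flags) and flags[j] == flags[i]:
--             j += 1
--         if flags[i]:
--             tables_detected += 1
--         i = j
--     return lines, tables_detected
-- ===== Notes on version B (the rewrite author's own statement) =====
-- stated objective: alternative
-- what changed: Drops A's per-line in_table state machine: B first materializes the boolean flag list, then counts maximal runs of equal flags (a hand-written groupby that jumps run to run) and tallies the True runs.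
import Mathlib
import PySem

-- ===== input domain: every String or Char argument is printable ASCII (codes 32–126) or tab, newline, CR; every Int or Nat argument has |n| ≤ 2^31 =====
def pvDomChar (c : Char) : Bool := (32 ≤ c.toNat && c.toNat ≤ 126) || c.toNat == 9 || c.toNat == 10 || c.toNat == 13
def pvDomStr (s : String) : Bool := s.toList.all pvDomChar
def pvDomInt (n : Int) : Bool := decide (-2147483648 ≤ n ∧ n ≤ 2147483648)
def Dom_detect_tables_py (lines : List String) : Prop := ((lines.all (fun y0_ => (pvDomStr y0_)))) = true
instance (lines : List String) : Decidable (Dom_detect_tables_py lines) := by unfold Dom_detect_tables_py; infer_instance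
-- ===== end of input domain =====

-- B replaces A's stateful in_table flag loop by a staged pass: build the flag list, then count
-- maximal runs of True flags by jumping run to run (a hand-written groupby); same cost.

-- ===== PORT A =====
-- '"|" in line and len(line.split("|")) >= 3' — the same expression appears in both Pythons
def pvTableLine (line : String) : Bool :=
  PySem.Str.isIn "|" line && decide (3 ≤ ((PySem.Str.split? line "|").getD []).length)

-- loop 'for line in lines' over state (tables_detected, in_table)
def pvLoopA (st : Int × Bool) (line : String) : Int × Bool :=
  if pvTableLine line then
    if !st.2 then (st.1 + 1, true) else st
  else
    (st.1, false)

def detect_tables_py (lines : List String) : List String × Int :=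
  let st := lines.foldl pvLoopA (0, false)
  (lines, st.1)

-- ===== PORT B =====
-- B's outer while loop: each iteration handles one maximal run of equal flags
-- (the inner 'while flags[j] == flags[i]' scan is the dropWhile) and recurses on the rest.
def pvRunCount : List Bool → Nat
  | [] => 0
  | x :: xs => (if x then 1 else 0) + pvRunCount (xs.dropWhile (· == x))
termination_by l => l.length
decreasing_by
  simp only [List.length_cons]
  exact Nat.lt_succ_of_le (List.length_dropWhile_le _ _)

def detect_tables_py_alt (lines : List String) : List String × Int :=
  let flags := lines.map pvTableLine
  (lines, (pvRunCount flags : Nat))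

-- ===== PRECONDITION & SPEC =====
def Spec_detect_tables_py (lines : List String) (out : List String × Int) : Prop := out = detect_tables_py_alt lines
instance (lines : List String) (out : List String × Int) : Decidable (Spec_detect_tables_py lines out) := by unfold Spec_detect_tables_py; infer_instance

-- ===== CLAIM (what is proved, stated in full; the proofs are below) =====
def Claim_equal_detect_tables_py : Prop := ∀ (lines : List String), Dom_detect_tables_py lines → Spec_detect_tables_py lines (detect_tables_py lines)

-- ===== LEMMAS AND PROOFS =====

-- reference count: number of False→True transitions given previous flag b
def pvRuns : Bool → List Bool → Nat
  | _, [] => 0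
  | b, f :: fs => (if f && !b then 1 else 0) + pvRuns f fs

theorem foldA_runs (lines : List String) (c : Int) (b : Bool) :
    (lines.foldl pvLoopA (c, b)).1 = c + pvRuns b (lines.map pvTableLine) := by
  induction lines generalizing c b with
  | nil => simp [pvRuns]
  | cons l rest ih =>
    cases hf : pvTableLine l <;> cases b <;>
      (simp [pvLoopA, hf, pvRuns, ih]; try ring)

-- dropping the leading run of the current flag does not change pvRuns
theorem runs_drop (xs : List Bool) (x : Bool) :
    pvRuns x xs = pvRuns x (xs.dropWhile (· == x)) := by
  induction xs with
  | nil => rfl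
  | cons a t ih =>
    by_cases h : a = x
    · subst h; simp [List.dropWhile, pvRuns, ih]
    · have hb : (a == x) = false := by simp [h]
      simp [List.dropWhile, hb, pvRuns]

-- after dropping the leading True run, previous flag true vs false is irrelevant
theorem runs_after_drop_true (xs : List Bool) :
    pvRuns true (xs.dropWhile (· == true)) = pvRuns false (xs.dropWhile (· == true)) := by
  induction xs with
  | nil => rfl
  | cons a t ih =>
    cases a
    · simp [List.dropWhile, pvRuns]
    · simpa [List.dropWhile] using ih

theorem runCount_eq : ∀ flags : List Bool, pvRunCount flags = pvRuns false flags
  | [] => by rw [pvRunCount, pvRuns]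
  | x :: xs => by
    rw [pvRunCount, runCount_eq (xs.dropWhile (· == x))]
    cases x
    · rw [pvRuns, ← runs_drop xs false]; simp
    · rw [pvRuns, runs_drop xs true, runs_after_drop_true xs]; simp
termination_by l => l.length
decreasing_by
  simp only [List.length_cons]
  exact Nat.lt_succ_of_le (List.length_dropWhile_le _ _)

-- ===== VERDICT (by name: the statement is the Claim_ definition above) =====
theorem detect_tables_py_spec : Claim_equal_detect_tables_py := by
  intro lines _
  show _ = _
  simp [detect_tables_py, detect_tables_py_alt, foldA_runs lines 0 false, runCount_eq]
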